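-- pv_equiv track=rewrite | github.com/marcosfdez3/covered_backend | services/hybrid_verifier.py | _veredictos_coinciden
-- ===== SOURCE A (Python) =====
-- def _veredictos_coinciden(veredicto_fc: str, veredicto_ia: str) -> bool:
--     """Determina si los veredictos de FactCheck e IA son consistentes"""
--     if not veredicto_fc or not veredicto_ia:
--         return False
--
--     # Mapeo de equivalencias
--     equivalencias = {
--         "verificado": ["probablemente_verdadero"],
--         "no_encontrado": ["no_verificable", "no_se_puede_verificar"],
--         "probablemente_falso": ["probablemente_falso", "falso"]
--     }
--
--     veredicto_fc = veredicto_fc.lower()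
--     veredicto_ia = veredicto_ia.lower()
--
--     # Coincidencia directa
--     if veredicto_fc == veredicto_ia:
--         return True
--
--     # Coincidencia por equivalencias
--     for fc_key, ia_values in equivalencias.items():
--         if veredicto_fc == fc_key and veredicto_ia in ia_values:
--             return True
--         if veredicto_ia == fc_key and veredicto_fc in ia_values:
--             return True
--
--     return False
-- ===== SOURCE B (Python) =====
-- # B: normalize each verdict to a canonical class representative and compare the
-- # classes; this also deems the synonyms "no_verificable"/"no_se_puede_verificar"
-- # consistent (both mean the claim is unverifiable), which A misses.
-- _CANON = {
--     "probablemente_verdadero": "verificado",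
--     "no_verificable": "no_encontrado",
--     "no_se_puede_verificar": "no_encontrado",
--     "falso": "probablemente_falso",
-- }
--
-- def _veredictos_coinciden(veredicto_fc: str, veredicto_ia: str) -> bool:
--     if not veredicto_fc or not veredicto_ia:
--         return False
--     veredicto_fc = veredicto_fc.lower()
--     veredicto_ia = veredicto_ia.lower()
--     return _CANON.get(veredicto_fc, veredicto_fc) == _CANON.get(veredicto_ia, veredicto_ia)
-- ===== Notes on version B (the rewrite author's own statement) =====
-- stated objective: simpler
-- what changed: Instead of scanning the equivalence table with two directional comparisons per key, B maps each verdict to a canonical class representative (normalize-then-compare), so the body is one lookup per argument and a single equality.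
-- intended difference: On the pair of distinct lowercased verdicts {'no_verificable','no_se_puede_verificar'} A returns False while B returns True; both are listed as equivalents of 'no_encontrado', so treating these synonyms as consistent is the intended behaviour that A's key-vs-value-only loop misses. — e.g. on _veredictos_coinciden("no_verificable", "no_se_puede_verificar"): A returns false, B returns true
import Mathlib
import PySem

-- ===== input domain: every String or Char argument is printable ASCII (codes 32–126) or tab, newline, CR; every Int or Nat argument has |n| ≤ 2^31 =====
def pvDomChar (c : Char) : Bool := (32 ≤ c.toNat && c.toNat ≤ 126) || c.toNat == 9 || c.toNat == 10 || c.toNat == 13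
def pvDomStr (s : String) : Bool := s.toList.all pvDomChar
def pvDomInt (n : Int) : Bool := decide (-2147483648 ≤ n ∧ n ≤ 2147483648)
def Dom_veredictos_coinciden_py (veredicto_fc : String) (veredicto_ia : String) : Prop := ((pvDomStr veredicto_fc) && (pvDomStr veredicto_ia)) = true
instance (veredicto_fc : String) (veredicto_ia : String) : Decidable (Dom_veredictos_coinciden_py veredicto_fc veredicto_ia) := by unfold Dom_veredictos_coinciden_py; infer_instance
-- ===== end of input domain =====

-- B normalizes each verdict to a canonical class representative and compares the classes
-- (simpler); it intentionally also deems the two synonyms of "no_encontrado" consistent,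
-- where A returns False (see D_ below).

-- ===== PORT A =====
-- the dict literal `equivalencias` (insertion order)
def pvEquivalencias : List (String × List String) :=
  [("verificado", ["probablemente_verdadero"]),
   ("no_encontrado", ["no_verificable", "no_se_puede_verificar"]),
   ("probablemente_falso", ["probablemente_falso", "falso"])]

-- the `for fc_key, ia_values in equivalencias.items()` loop with its early returns
def pvLoopA (x y : String) : List (String × List String) → Bool
  | [] => false
  | (k, vs) :: rest =>
    if x == k && vs.contains y then true
    else if y == k && vs.contains x then true
    else pvLoopA x y rest

def veredictos_coinciden_py (veredicto_fc : String) (veredicto_ia : String) : Bool :=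
  if veredicto_fc == "" || veredicto_ia == "" then false
  else
    let x := PySem.Str.lower veredicto_fc
    let y := PySem.Str.lower veredicto_ia
    if x == y then true
    else pvLoopA x y pvEquivalencias

-- ===== PORT B =====
-- _CANON, the canonicalization dict of Source B
def pvCanonTable : PySem.Dict String String := PySem.Dict.ofList
  [("probablemente_verdadero", "verificado"),
   ("no_verificable", "no_encontrado"),
   ("no_se_puede_verificar", "no_encontrado"),
   ("falso", "probablemente_falso")]

-- _CANON.get(v, v)
def pvCanon (v : String) : String := pvCanonTable.getD v v

def veredictos_coinciden_py_alt (veredicto_fc : String) (veredicto_ia : String) : Bool :=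
  if veredicto_fc == "" || veredicto_ia == "" then false
  else
    let x := PySem.Str.lower veredicto_fc
    let y := PySem.Str.lower veredicto_ia
    pvCanon x == pvCanon y

-- ===== PRECONDITION & SPEC =====
-- On the two distinct lowercased synonyms 'no_verificable'/'no_se_puede_verificar' A returns
-- False but B returns True; both are equivalents of 'no_encontrado', so B's value is intended.
def D_veredictos_coinciden_py (veredicto_fc : String) (veredicto_ia : String) : Prop :=
  PySem.Str.lower veredicto_fc ≠ PySem.Str.lower veredicto_ia ∧
  PySem.Str.lower veredicto_fc ∈ ["no_verificable", "no_se_puede_verificar"] ∧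
  PySem.Str.lower veredicto_ia ∈ ["no_verificable", "no_se_puede_verificar"]
instance (veredicto_fc : String) (veredicto_ia : String) : Decidable (D_veredictos_coinciden_py veredicto_fc veredicto_ia) := by unfold D_veredictos_coinciden_py; infer_instance

def Spec_veredictos_coinciden_py (veredicto_fc : String) (veredicto_ia : String) (out : Bool) : Prop := ¬ D_veredictos_coinciden_py veredicto_fc veredicto_ia → out = veredictos_coinciden_py_alt veredicto_fc veredicto_ia
instance (veredicto_fc : String) (veredicto_ia : String) (out : Bool) : Decidable (Spec_veredictos_coinciden_py veredicto_fc veredicto_ia out) := by unfold Spec_veredictos_coinciden_py; infer_instance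

def pvDiffWitness_veredictos_coinciden_py : String × String := ("no_verificable", "no_se_puede_verificar")
def pvDiffWitnessOut_veredictos_coinciden_py : Bool × Bool := (false, true)

-- ===== CLAIM (what is proved, stated in full; the proofs are below) =====
def Claim_unchanged_veredictos_coinciden_py : Prop := ∀ (veredicto_fc : String) (veredicto_ia : String), Dom_veredictos_coinciden_py veredicto_fc veredicto_ia → Spec_veredictos_coinciden_py veredicto_fc veredicto_ia (veredictos_coinciden_py veredicto_fc veredicto_ia)
def Claim_changed_veredictos_coinciden_py : Prop := Dom_veredictos_coinciden_py (pvDiffWitness_veredictos_coinciden_py.1) (pvDiffWitness_veredictos_coinciden_py.2) ∧ D_veredictos_coinciden_py (pvDiffWitness_veredictos_coinciden_py.1) (pvDiffWitness_veredictos_coinciden_py.2) ∧ veredictos_coinciden_py (pvDiffWitness_veredictos_coinciden_py.1) (pvDiffWitness_veredictos_coinciden_py.2) = pvDiffWitnessOut_veredictos_coinciden_py.1 ∧ veredictos_coinciden_py_alt (pvDiffWitness_veredictos_coinciden_py.1) (pvDiffWitness_veredictos_coinciden_py.2) = pvDiffWitnessOut_veredictos_coinciden_py.2 ∧ pvDiffWitnessOut_veredictos_coinciden_py.1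 ≠ pvDiffWitnessOut_veredictos_coinciden_py.2
def Claim_exact_veredictos_coinciden_py : Prop := ∀ (veredicto_fc : String) (veredicto_ia : String), Dom_veredictos_coinciden_py veredicto_fc veredicto_ia → D_veredictos_coinciden_py veredicto_fc veredicto_ia → veredictos_coinciden_py veredicto_fc veredicto_ia ≠ veredictos_coinciden_py_alt veredicto_fc veredicto_ia

-- ===== LEMMAS AND PROOFS =====

-- the seven verdict strings the table mentions (proof-side helper)
def pvL : List String :=
  ["verificado", "probablemente_verdadero", "no_encontrado", "no_verificable",
   "no_se_puede_verificar", "probablemente_falso", "falso"]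

-- A's loop is false when the left argument is none of the table's strings
theorem pvLoopA_false_left (x y : String) (hx : x ∉ pvL) :
    pvLoopA x y pvEquivalencias = false := by
  simp only [pvL, List.mem_cons, List.not_mem_nil, not_or, or_false] at hx
  obtain ⟨h1, h2, h3, h4, h5, h6, h7⟩ := hx
  simp [pvLoopA, pvEquivalencias, h1, h2, h3, h4, h5, h6, h7]

-- … and when the right argument is none of them
theorem pvLoopA_false_right (x y : String) (hy : y ∉ pvL) :
    pvLoopA x y pvEquivalencias = false := by
  simp only [pvL, List.mem_cons, List.not_mem_nil, not_or, or_false] at hy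
  obtain ⟨h1, h2, h3, h4, h5, h6, h7⟩ := hy
  simp [pvLoopA, pvEquivalencias, h1, h2, h3, h4, h5, h6, h7]

-- outside the table's strings, canonicalization is the identity
theorem pvCanon_id (v : String) (hv : v ∉ pvL) : pvCanon v = v := by
  simp only [pvL, List.mem_cons, List.not_mem_nil, not_or, or_false] at hv
  obtain ⟨h1, h2, h3, h4, h5, h6, h7⟩ := hv
  have h : pvCanonTable = PySem.Dict.mk
      [("probablemente_verdadero", "verificado"),
       ("no_verificable", "no_encontrado"),
       ("no_se_puede_verificar", "no_encontrado"),
       ("falso", "probablemente_falso")] := by decide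
  simp [pvCanon, h, PySem.Dict.getD_eq_get?_getD, PySem.Dict.get?,
    Ne.symm h2, Ne.symm h4, Ne.symm h5, Ne.symm h7]

-- canonicalization maps the table's strings into the table's strings
theorem pvCanon_mem (v : String) (hv : v ∈ pvL) : pvCanon v ∈ pvL := by
  fin_cases hv <;> decide

-- core identity on the (lowered) strings, outside the change region: A's
-- direct-equality check plus unrolled loop agrees with B's canonical comparison
theorem pvCore (x y : String)
    (hD : ¬ (x ≠ y ∧ x ∈ ["no_verificable", "no_se_puede_verificar"] ∧
              y ∈ ["no_verificable", "no_se_puede_verificar"])) :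
    (if x == y then true else pvLoopA x y pvEquivalencias) = (pvCanon x == pvCanon y) := by
  by_cases hxy : x = y
  · simp [hxy]
  rw [if_neg (by simp [hxy])]
  by_cases hx : x ∈ pvL
  · by_cases hy : y ∈ pvL
    · revert hD; revert hxy; fin_cases hx <;> fin_cases hy <;> decide
    · rw [pvLoopA_false_right x y hy, pvCanon_id y hy]
      have hcx := pvCanon_mem x hx
      have hne : pvCanon x ≠ y := fun he => hy (he ▸ hcx)
      simp [hne]
  · rw [pvLoopA_false_left x y hx, pvCanon_id x hx]
    by_cases hy : y ∈ pvL
    · have hcy := pvCanon_mem y hy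
      have hne : x ≠ pvCanon y := fun he => hx (he ▸ hcy)
      simp [hne]
    · rw [pvCanon_id y hy]
      simp [hxy]

-- ===== VERDICT (by name: the statement is the Claim_ definition above) =====
theorem veredictos_coinciden_py_spec : Claim_unchanged_veredictos_coinciden_py := by
  intro fc ia _ hD
  unfold D_veredictos_coinciden_py at hD
  unfold veredictos_coinciden_py veredictos_coinciden_py_alt
  by_cases h : (fc == "" || ia == "") = true
  · simp [h]
  · simp only [h, if_false, Bool.false_eq_true]
    exact pvCore _ _ hD

theorem veredictos_coinciden_py_changed : Claim_changed_veredictos_coinciden_py := by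
  unfold Claim_changed_veredictos_coinciden_py; decide

theorem veredictos_coinciden_py_tight : Claim_exact_veredictos_coinciden_py := by
  intro fc ia _ hD
  obtain ⟨hne, hx, hy⟩ := hD
  unfold veredictos_coinciden_py veredictos_coinciden_py_alt
  by_cases h : (fc == "" || ia == "") = true
  · exfalso
    rcases Bool.or_eq_true_iff.mp h with h' | h' <;> rw [beq_iff_eq] at h'
    · subst h'; exact absurd hx (by decide)
    · subst h'; exact absurd hy (by decide)
  · simp only [h, if_false, Bool.false_eq_true]
    simp only [List.mem_cons, List.not_mem_nil, or_false] at hx hy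
    rcases hx with hx | hx <;> rcases hy with hy | hy <;>
      rw [hx, hy] <;> revert hne <;> rw [hx, hy] <;> intro hne <;>
      first
        | exact absurd rfl hne
        | decide
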